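-- pv_equiv track=rewrite | github.com/viktormurashov/test | 196/DO/number2.py | find_cyclic_shift
-- ===== SOURCE A (Python) =====
-- def compute_prefix(pattern):
--     n = len(pattern)
--     prefix = [0] * n
--     j = 0
--     for i in range(1, n):
--         while j > 0 and pattern[i] != pattern[j]:
--             j = prefix[j-1]
--         if pattern[i] == pattern[j]:
--             j += 1
--         else:
--             j = 0
--         prefix[i] = j
--     return prefix
--
-- def kmp_search(text, pattern):
--     n = len(pattern)
--     m = len(text)
--     if n == 0:
--         return []
--     prefix = compute_prefix(pattern)
--     j = 0
--     occurrences = []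
--     for i in range(m):
--         while j > 0 and text[i] != pattern[j]:
--             j = prefix[j-1]
--         if text[i] == pattern[j]:
--             j += 1
--         if j == n:
--             start_index = i - n + 1
--             occurrences.append(start_index)
--             j = prefix[j-1]
--     return occurrences
--
-- def find_cyclic_shift(S, T):
--     n = len(S)
--     if n != len(T):
--         return -1
--
--     if n == 0:
--         return 0
--
--     S2 = S + S
--     occurrences = kmp_search(S2, T)
--     indices = [i for i in occurrences if i < n]
--
--     if not indices:
--         return -1
--     else:
--         k_list = [(n - i) % n for i in indices]
--         return min(k_list)
-- ===== SOURCE B (Python) =====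
-- def find_cyclic_shift(S, T):
--     n = len(S)
--     if n != len(T):
--         return -1
--     if n == 0:
--         return 0
--     best = -1
--     for i in range(n):
--         if S[i:] + S[:i] == T:
--             k = (n - i) % n
--             if best == -1 or k < best:
--                 best = k
--     return best
-- ===== Notes on version B (the rewrite author's own statement) =====
-- stated objective: simpler
-- what changed: Replaced the KMP prefix-table construction and scan of S+S by a direct brute-force loop over all n rotations of S, keeping a running minimum of the shift values (n-i)%n.
import Mathlib
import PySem

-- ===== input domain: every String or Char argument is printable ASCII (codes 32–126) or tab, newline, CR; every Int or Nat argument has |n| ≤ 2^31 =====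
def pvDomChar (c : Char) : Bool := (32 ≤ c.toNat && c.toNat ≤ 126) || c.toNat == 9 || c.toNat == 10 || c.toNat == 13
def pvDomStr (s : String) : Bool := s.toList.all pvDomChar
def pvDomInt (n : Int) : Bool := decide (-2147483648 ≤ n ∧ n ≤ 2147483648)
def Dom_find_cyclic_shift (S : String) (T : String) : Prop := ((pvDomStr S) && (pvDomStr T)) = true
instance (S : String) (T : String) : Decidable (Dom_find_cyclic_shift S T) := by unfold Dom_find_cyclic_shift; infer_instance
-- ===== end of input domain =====

-- B replaces A's KMP prefix-table construction and scan of S+S by a direct brute-force loop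
-- over all n rotations of S with a running minimum of (n-i)%n (objective: simpler).

-- ===== PORT A =====
-- the shared `while j > 0 and text[i] != pattern[j]: j = prefix[j-1]` loop of compute_prefix
-- and kmp_search; the fuel argument only makes it total (fuel = entry j always suffices,
-- since prefix entries are strictly below their index + 1)
def kmpAdjust (pat : List Char) (pre : List Nat) (c : Char) : Nat → Nat → Nat
  | 0, j => j
  | fuel+1, j => if 0 < j ∧ c ≠ pat.getD j ' ' then kmpAdjust pat pre c fuel (pre.getD (j-1) 0) else j

-- loop body of compute_prefix (state: the prefix array and j)
def prefStep (pat : List Char) (st : List Nat × Nat) (i : Nat) : List Nat × Nat :=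
  let j0 := kmpAdjust pat st.1 (pat.getD i ' ') st.2 st.2
  let j1 := if pat.getD i ' ' = pat.getD j0 ' ' then j0 + 1 else 0
  (st.1.set i j1, j1)

def computePrefix (pat : List Char) : List Nat :=
  ((List.range' 1 (pat.length - 1)).foldl (prefStep pat) (List.replicate pat.length 0, 0)).1

-- loop body of kmp_search (state: j and the occurrence list)
def searchStep (text pat : List Char) (pre : List Nat) (st : Nat × List Nat) (i : Nat) : Nat × List Nat :=
  let c := text.getD i ' '
  let j0 := kmpAdjust pat pre c st.1 st.1
  let j1 := if c = pat.getD j0 ' ' then j0 + 1 else j0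
  if j1 = pat.length then (pre.getD (pat.length - 1) 0, st.2 ++ [i + 1 - pat.length])
  else (j1, st.2)

def kmpSearch (text pat : List Char) : List Nat :=
  if pat.length = 0 then [] else
  ((List.range text.length).foldl (searchStep text pat (computePrefix pat)) (0, ([] : List Nat))).2

def find_cyclic_shift (S : String) (T : String) : Int :=
  let s := S.toList
  let t := T.toList
  if s.length ≠ t.length then -1
  else if s.length = 0 then 0
  else
    let occs := kmpSearch (s ++ s) t
    let indices := occs.filter (fun i => i < s.length)
    if indices = [] then -1
    else match (indices.map (fun i => (s.length - i) % s.length)).min? with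
      | some k => (k : Int)
      | none => -1   -- unreachable: indices ≠ [] (totality guard for Option)

-- ===== PORT B =====
-- loop body of B's rotation scan (state: the running minimum, -1 = none yet)
def bStep (s t : List Char) (best : Int) (i : Nat) : Int :=
  if s.drop i ++ s.take i = t then
    let k : Int := ((s.length - i) % s.length : Nat)
    if best = -1 ∨ k < best then k else best
  else best

def find_cyclic_shift_alt (S : String) (T : String) : Int :=
  let s := S.toList
  let t := T.toList
  if s.length ≠ t.length then -1
  else if s.length = 0 then 0
  else (List.range s.length).foldl (bStep s t) (-1)

-- ===== PRECONDITION & SPEC =====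
def Spec_find_cyclic_shift (S : String) (T : String) (out : Int) : Prop := out = find_cyclic_shift_alt S T
instance (S : String) (T : String) (out : Int) : Decidable (Spec_find_cyclic_shift S T out) := by unfold Spec_find_cyclic_shift; infer_instance

-- ===== CLAIM (what is proved, stated in full; the proofs are below) =====
def Claim_equal_find_cyclic_shift : Prop := ∀ (S : String) (T : String), Dom_find_cyclic_shift S T → Spec_find_cyclic_shift S T (find_cyclic_shift S T)

-- ===== LEMMAS AND PROOFS =====

-- `Cand p u j`: the length-j prefix of the pattern p is a suffix of the text read so far u
def Cand (p u : List Char) (j : Nat) : Prop := j ≤ p.length ∧ p.take j <:+ u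

-- `PreGood p pre k`: entry k of the prefix array is the length of the longest proper
-- border of p.take (k+1)
def PreGood (p : List Char) (pre : List Nat) (k : Nat) : Prop :=
  pre.getD k 0 ≤ k ∧ Cand p (p.take (k+1)) (pre.getD k 0) ∧
  ∀ j, j ≤ k → Cand p (p.take (k+1)) j → j ≤ pre.getD k 0

-- the while loop followed by the conditional increment, as one function
def kmpStep (p : List Char) (pre : List Nat) (c : Char) (s : Nat) : Nat :=
  let r := kmpAdjust p pre c s s
  if c = p.getD r ' ' then r + 1 else r

theorem cand_zero (p u : List Char) : Cand p u 0 := ⟨Nat.zero_le _, by simp⟩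

theorem suffix_of_le {α : Type} {l₁ l₂ u : List α} (h1 : l₁ <:+ u) (h2 : l₂ <:+ u)
    (h : l₁.length ≤ l₂.length) : l₁ <:+ l₂ := by
  rw [← List.reverse_prefix] at h1 h2 ⊢
  exact List.prefix_of_prefix_length_le h1 h2 (by simpa)

theorem cand_down {p u : List Char} {s j : Nat} (hs : Cand p u s) (hj : Cand p u j)
    (hle : j ≤ s) : Cand p (p.take s) j := by
  refine ⟨hj.1, suffix_of_le hj.2 hs.2 ?_⟩
  have h1 := hj.1; have h2 := hs.1
  simp [List.length_take]; omega

theorem take_getD {α : Type} (l : List α) (i : Nat) (d : α) (h : i < l.length) :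
    l.take (i+1) = l.take i ++ [l.getD i d] := by
  rw [List.take_add_one]
  simp [List.getD_eq_getElem?_getD, List.getElem?_eq_getElem h]

theorem snoc_suffix_snoc {xs u : List Char} {a c : Char} :
    xs ++ [a] <:+ u ++ [c] ↔ a = c ∧ xs <:+ u := by
  rw [← List.reverse_prefix, List.reverse_append, List.reverse_append]
  simp only [List.reverse_singleton, List.singleton_append, List.cons_prefix_cons]
  rw [List.reverse_prefix]

theorem cand_ext {p u : List Char} {c : Char} {j : Nat} (hj : j < p.length) :
    Cand p (u ++ [c]) (j+1) ↔ (Cand p u j ∧ p.getD j ' ' = c) := by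
  unfold Cand
  rw [take_getD p j ' ' hj, snoc_suffix_snoc]
  constructor
  · rintro ⟨h1, h2, h3⟩; exact ⟨⟨by omega, h3⟩, h2⟩
  · rintro ⟨⟨h1, h2⟩, h3⟩; exact ⟨by omega, h3, h2⟩

theorem adjust_spec (p : List Char) (pre : List Nat) (c : Char) (u : List Char) :
    ∀ fuel s, s ≤ fuel → Cand p u s → (∀ k, k < s → PreGood p pre k) →
      kmpAdjust p pre c fuel s ≤ s ∧ Cand p u (kmpAdjust p pre c fuel s) ∧
      (kmpAdjust p pre c fuel s = 0 ∨ c = p.getD (kmpAdjust p pre c fuel s) ' ') ∧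
      ∀ j, j ≤ s → Cand p u j → c = p.getD j ' ' → j ≤ kmpAdjust p pre c fuel s := by
  intro fuel
  induction fuel with
  | zero =>
    intro s hs hc hpre
    have : s = 0 := by omega
    subst this
    exact ⟨Nat.le_refl _, hc, Or.inl rfl, fun j hj _ _ => hj⟩
  | succ f ih =>
    intro s hs hc hpre
    by_cases hcond : 0 < s ∧ c ≠ p.getD s ' '
    · have heq : kmpAdjust p pre c (f+1) s = kmpAdjust p pre c f (pre.getD (s-1) 0) := by
        simp only [kmpAdjust, if_pos hcond]
      have hpg := hpre (s-1) (by omega)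
      simp only [PreGood] at hpg
      rw [show s - 1 + 1 = s by omega] at hpg
      obtain ⟨hpg1, hpg2, hpg3⟩ := hpg
      have hcs' : Cand p u (pre.getD (s-1) 0) := ⟨hpg2.1, hpg2.2.trans hc.2⟩
      obtain ⟨ih1, ih2, ih3, ih4⟩ := ih (pre.getD (s-1) 0) (by omega) hcs'
        (fun k hk => hpre k (by omega))
      rw [heq]
      refine ⟨by omega, ih2, ih3, ?_⟩
      intro j hj hcj hcje
      have hjne : j ≠ s := by rintro rfl; exact hcond.2 hcje
      have hjb : Cand p (p.take s) j := cand_down hc hcj (by omega)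
      exact ih4 j (by have := hpg3 j (by omega) hjb; omega) hcj hcje
    · have heq : kmpAdjust p pre c (f+1) s = s := by
        simp only [kmpAdjust, if_neg hcond]
      rw [heq]
      push Not at hcond
      refine ⟨le_refl s, hc, ?_, fun j hj _ _ => hj⟩
      rcases Nat.eq_zero_or_pos s with h0 | h0
      · exact Or.inl h0
      · exact Or.inr (hcond h0)

theorem step_spec (p : List Char) (pre : List Nat) (c : Char) (u : List Char) (s cap : Nat)
    (hn : cap + 1 ≤ p.length) (hscap : s ≤ cap) (hs : Cand p u s)
    (hmax : ∀ j, j ≤ cap → Cand p u j → j ≤ s)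
    (hpre : ∀ k, k < s → PreGood p pre k) :
    kmpStep p pre c s ≤ cap + 1 ∧ Cand p (u ++ [c]) (kmpStep p pre c s) ∧
    ∀ j, j ≤ cap + 1 → Cand p (u ++ [c]) j → j ≤ kmpStep p pre c s := by
  obtain ⟨ha1, ha2, ha3, ha4⟩ := adjust_spec p pre c u s s (le_refl s) hs hpre
  unfold kmpStep
  set r := kmpAdjust p pre c s s with hr
  by_cases hm : c = p.getD r ' '
  · rw [if_pos hm]
    refine ⟨by omega, ?_, ?_⟩
    · exact (cand_ext (by omega)).mpr ⟨ha2, hm.symm⟩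
    · intro j hj hcj
      rcases Nat.eq_zero_or_pos j with h0 | h0
      · omega
      · obtain ⟨j', rfl⟩ : ∃ j', j = j' + 1 := ⟨j - 1, by omega⟩
        obtain ⟨hcj', hpj'⟩ := (cand_ext (by omega)).mp hcj
        have hj's : j' ≤ s := hmax j' (by omega) hcj'
        have := ha4 j' hj's hcj' hpj'.symm
        omega
  · rw [if_neg hm]
    have hr0 : r = 0 := by
      rcases ha3 with h | h
      · exact h
      · exact absurd h hm
    refine ⟨by omega, by rw [hr0]; exact cand_zero _ _, ?_⟩
    intro j hj hcj
    rcases Nat.eq_zero_or_pos j with h0 | h0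
    · omega
    · obtain ⟨j', rfl⟩ : ∃ j', j = j' + 1 := ⟨j - 1, by omega⟩
      obtain ⟨hcj', hpj'⟩ := (cand_ext (by omega)).mp hcj
      have hj's : j' ≤ s := hmax j' (by omega) hcj'
      have := ha4 j' hj's hcj' hpj'.symm
      -- then c = p.getD j' ' ' with j' ≤ r, and r exits with mismatch: show contradiction or j'+1 ≤ r
      have hj'r : j' ≤ r := this
      rcases Nat.lt_or_ge j' r with hlt | hge
      · omega
      · have : j' = r := by omega
        subst this
        exact absurd hpj'.symm hm

theorem getD_set_ne {l : List Nat} {i k : Nat} (h : i ≠ k) (a : Nat) :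
    (l.set i a).getD k 0 = l.getD k 0 := by
  simp [List.getD_eq_getElem?_getD, h]

theorem getD_set_self {l : List Nat} {i : Nat} (h : i < l.length) (a : Nat) :
    (l.set i a).getD i 0 = a := by
  simp [List.getD_eq_getElem?_getD, h]

def PrefInv (p : List Char) (i : Nat) (st : List Nat × Nat) : Prop :=
  st.1.length = p.length ∧ (∀ k, k ≤ i → PreGood p st.1 k) ∧ st.2 = st.1.getD i 0

theorem pref_loop (p : List Char) :
    ∀ m, m + 1 ≤ p.length →
      PrefInv p m ((List.range' 1 m).foldl (prefStep p) (List.replicate p.length 0, 0)) := by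
  intro m
  induction m with
  | zero =>
    intro h
    refine ⟨by simp, ?_, ?_⟩
    · intro k hk
      interval_cases k
      exact ⟨by simp, by simp; exact cand_zero _ _,
        fun j hj _ => by simp; omega⟩
    · simp
  | succ m ih =>
    intro h
    obtain ⟨hlen, hgood, hj⟩ := ih (by omega)
    rw [show List.range' 1 (m+1) = List.range' 1 m ++ [m+1] by
      rw [List.range'_concat]; congr 2; omega, List.foldl_append]
    set st := (List.range' 1 m).foldl (prefStep p) (List.replicate p.length 0, 0) with hst
    obtain ⟨hg1, hg2, hg3⟩ := hgood m (le_refl m)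
    have hscap : st.2 ≤ m := by rw [hj]; exact hg1
    have hs : Cand p (p.take (m+1)) st.2 := by rw [hj]; exact hg2
    have hmax : ∀ j, j ≤ m → Cand p (p.take (m+1)) j → j ≤ st.2 := by
      intro j hjm hcj; rw [hj]; exact hg3 j hjm hcj
    have hpre : ∀ k, k < st.2 → PreGood p st.1 k := fun k hk => hgood k (by omega)
    set c := p.getD (m+1) ' ' with hc
    obtain ⟨hs1, hs2, hs3⟩ := step_spec p st.1 c (p.take (m+1)) st.2 m (by omega) hscap hs hmax hpre
    obtain ⟨-, -, ha3, -⟩ := adjust_spec p st.1 c (p.take (m+1)) st.2 st.2 (le_refl _) hs hpre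
    have hbridge : prefStep p st (m+1) =
        (st.1.set (m+1) (kmpStep p st.1 c st.2), kmpStep p st.1 c st.2) := by
      simp only [prefStep, kmpStep, ← hc]
      by_cases hm : c = p.getD (kmpAdjust p st.1 c st.2 st.2) ' '
      · rw [if_pos hm, if_pos hm]
      · rw [if_neg hm, if_neg hm]
        rcases ha3 with h0 | h0
        · rw [h0]
        · exact absurd h0 hm
    show PrefInv p (m+1) (prefStep p st (m+1))
    rw [hbridge]
    have hlt : m + 1 < p.length := by omega
    have hext : p.take (m+1) ++ [c] = p.take (m+2) := (take_getD p (m+1) ' ' hlt).symm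
    refine ⟨by simpa using hlen, ?_, (getD_set_self (by omega) _).symm⟩
    intro k hk
    rcases Nat.lt_or_ge k (m+1) with hk' | hk'
    · obtain ⟨hp1, hp2, hp3⟩ := hgood k (by omega)
      rw [PreGood, getD_set_ne (by omega) _]
      exact ⟨hp1, hp2, hp3⟩
    · have : k = m + 1 := by omega
      subst this
      rw [PreGood, getD_set_self (by omega) _]
      refine ⟨by omega, ?_, ?_⟩
      · rw [show m + 1 + 1 = m + 2 from rfl, ← hext]; exact hs2
      · intro j hjk hcj
        rw [show m + 1 + 1 = m + 2 from rfl, ← hext] at hcj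
        exact hs3 j (by omega) hcj

theorem computePrefix_good (p : List Char) (hp : 0 < p.length) :
    ∀ k, k < p.length → PreGood p (computePrefix p) k := by
  intro k hk
  have := pref_loop p (p.length - 1) (by omega)
  obtain ⟨-, hgood, -⟩ := this
  exact hgood k (by omega)

theorem occAt_iff (t p : List Char) (x : Nat) (h : x + p.length ≤ t.length) :
    p <:+ t.take (x + p.length) ↔ (t.drop x).take p.length = p := by
  rw [List.take_add]
  constructor
  · rintro ⟨w, hw⟩
    have hlen : w.length = (t.take x).length := by
      have := congrArg List.length hw
      simp at this ⊢; omega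
    exact (List.append_inj_right hw hlen).symm
  · intro he; rw [he]; exact List.suffix_append _ _

def SearchInv (t p : List Char) (i : Nat) (st : Nat × List Nat) : Prop :=
  Cand p (t.take i) st.1 ∧ st.1 < p.length ∧
  (∀ j, Cand p (t.take i) j → j < p.length → j ≤ st.1) ∧
  (∀ x, x ∈ st.2 ↔ x + p.length ≤ i ∧ (t.drop x).take p.length = p)

theorem search_loop (t p : List Char) (hp : 0 < p.length) :
    ∀ m, m ≤ t.length →
      SearchInv t p m ((List.range m).foldl (searchStep t p (computePrefix p)) (0, [])) := by
  intro m
  induction m with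
  | zero =>
    intro _
    refine ⟨cand_zero _ _, hp, ?_, ?_⟩
    · intro j hcj hjn
      have h2 := hcj.2
      simp only [List.take_zero, List.suffix_nil] at h2
      rcases List.take_eq_nil_iff.mp h2 with h | h
      · omega
      · rw [h] at hp; simp at hp
    · intro x
      constructor
      · intro hx; simp at hx
      · rintro ⟨h1, -⟩; omega
  | succ m ih =>
    intro h
    obtain ⟨hc1, hc2, hc3, hc4⟩ := ih (by omega)
    rw [List.range_succ, List.foldl_append]
    set st := (List.range m).foldl (searchStep t p (computePrefix p)) (0, ([] : List Nat)) with hst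
    set c := t.getD m ' ' with hcdef
    have hpre := computePrefix_good p hp
    have hmax' : ∀ j, j ≤ p.length - 1 → Cand p (t.take m) j → j ≤ st.1 :=
      fun j hj hcj => hc3 j hcj (by omega)
    obtain ⟨hs1, hs2, hs3⟩ := step_spec p (computePrefix p) c (t.take m) st.1 (p.length - 1)
      (by omega) (by omega) hc1 hmax' (fun k hk => hpre k (by omega))
    have hext : t.take m ++ [c] = t.take (m+1) := (take_getD t m ' ' (by omega)).symm
    rw [hext] at hs2 hs3
    show SearchInv t p (m+1) (searchStep t p (computePrefix p) st m)
    have hstep : searchStep t p (computePrefix p) st m =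
        if kmpStep p (computePrefix p) c st.1 = p.length
        then ((computePrefix p).getD (p.length - 1) 0, st.2 ++ [m + 1 - p.length])
        else (kmpStep p (computePrefix p) c st.1, st.2) := rfl
    rw [hstep]
    by_cases hfull : kmpStep p (computePrefix p) c st.1 = p.length
    · rw [if_pos hfull]
      have hfullCand : Cand p (t.take (m+1)) p.length := hfull ▸ hs2
      have hsuf : p <:+ t.take (m+1) := by
        have h2 := hfullCand.2; rwa [List.take_length] at h2
      have hnm : p.length ≤ m + 1 := by
        have := hsuf.length_le; simp at this; omega
      obtain ⟨hb1, hb2, hb3⟩ := hpre (p.length - 1) (by omega)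
      rw [show p.length - 1 + 1 = p.length by omega, List.take_length] at hb2 hb3
      refine ⟨⟨hb2.1, hb2.2.trans hsuf⟩, by omega, ?_, ?_⟩
      · intro j hcj hjn
        have hcp : Cand p (p.take p.length) j := cand_down hfullCand hcj hcj.1
        rw [List.take_length] at hcp
        exact hb3 j (by omega) hcp
      · intro x
        simp only [List.mem_append, List.mem_singleton]
        rw [hc4 x]
        constructor
        · rintro (⟨hx1, hx2⟩ | rfl)
          · exact ⟨by omega, hx2⟩
          · refine ⟨by omega, ?_⟩
            have hxn : m + 1 - p.length + p.length = m + 1 := by omega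
            exact (occAt_iff t p (m+1-p.length) (by omega)).mp (by rw [hxn]; exact hsuf)
        · rintro ⟨hx1, hx2⟩
          rcases Nat.lt_or_ge (x + p.length) (m+1) with hlt | hge
          · exact Or.inl ⟨by omega, hx2⟩
          · right; omega
    · rw [if_neg hfull]
      have hs1' : kmpStep p (computePrefix p) c st.1 < p.length := by omega
      refine ⟨hs2, hs1', fun j hcj hjn => hs3 j (by omega) hcj, ?_⟩
      intro x
      rw [hc4 x]
      constructor
      · rintro ⟨hx1, hx2⟩; exact ⟨by omega, hx2⟩
      · rintro ⟨hx1, hx2⟩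
        refine ⟨?_, hx2⟩
        rcases Nat.lt_or_ge (x + p.length) (m+1) with hlt | hge
        · omega
        · exfalso
          have hxe : x + p.length = m + 1 := by omega
          have hsuf : p <:+ t.take (m+1) := by
            rw [← hxe]; exact (occAt_iff t p x (by omega)).mpr hx2
          have hcn : Cand p (t.take (m+1)) p.length :=
            ⟨le_refl _, by rw [List.take_length]; exact hsuf⟩
          have := hs3 p.length (by omega) hcn
          omega

theorem kmpSearch_mem (t p : List Char) (hp : 0 < p.length) (x : Nat) :
    x ∈ kmpSearch t p ↔ x + p.length ≤ t.length ∧ (t.drop x).take p.length = p := by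
  unfold kmpSearch
  rw [if_neg (by omega)]
  exact (search_loop t p hp t.length (le_refl _)).2.2.2 x

theorem rot_eq (s : List Char) (x : Nat) (h : x ≤ s.length) :
    ((s ++ s).drop x).take s.length = s.drop x ++ s.take x := by
  rw [List.drop_append, show x - s.length = 0 by omega, List.drop_zero,
    List.take_append, List.take_of_length_le (by simp)]
  congr 1
  simp
  omega

def BInv (s t : List Char) (k : Nat) (r : Int) : Prop :=
  (r = -1 ∧ ∀ i, i < k → s.drop i ++ s.take i ≠ t) ∨
  (∃ i, i < k ∧ s.drop i ++ s.take i = t ∧ r = ((s.length - i) % s.length : Nat) ∧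
    ∀ i', i' < k → s.drop i' ++ s.take i' = t → r ≤ ((s.length - i') % s.length : Nat))

theorem b_loop (s t : List Char) :
    ∀ k, BInv s t k ((List.range k).foldl (bStep s t) (-1)) := by
  intro k
  induction k with
  | zero =>
    left
    exact ⟨rfl, fun i hi => by omega⟩
  | succ k ih =>
    rw [List.range_succ, List.foldl_append]
    set r := (List.range k).foldl (bStep s t) (-1) with hr
    show BInv s t (k+1) (bStep s t r k)
    unfold bStep
    by_cases hm : s.drop k ++ s.take k = t
    · rw [if_pos hm]
      set kv : Int := (((s.length - k) % s.length : Nat) : Int) with hkv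
      have hkv0 : 0 ≤ kv := Int.natCast_nonneg _
      rcases ih with ⟨hrn, hnone⟩ | ⟨i0, hi0k, hi0m, hi0v, hi0min⟩
      · rw [if_pos (Or.inl hrn)]
        right
        refine ⟨k, by omega, hm, rfl, ?_⟩
        intro i' hi' hm'
        rcases Nat.lt_or_ge i' k with h | h
        · exact absurd hm' (hnone i' h)
        · have : i' = k := by omega
          subst this; exact le_refl _
      · have hrne : r ≠ -1 := by
          rw [hi0v]; have : (0:Int) ≤ (((s.length - i0) % s.length : Nat) : Int) := Int.natCast_nonneg _
          omega
        by_cases hlt : kv < r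
        · rw [if_pos (Or.inr hlt)]
          right
          refine ⟨k, by omega, hm, rfl, ?_⟩
          intro i' hi' hm'
          rcases Nat.lt_or_ge i' k with h | h
          · exact le_of_lt (lt_of_lt_of_le hlt (hi0min i' h hm'))
          · have : i' = k := by omega
            subst this; exact le_refl _
        · rw [if_neg (by rintro (h | h); exact hrne h; exact hlt h)]
          right
          refine ⟨i0, by omega, hi0m, hi0v, ?_⟩
          intro i' hi' hm'
          rcases Nat.lt_or_ge i' k with h | h
          · exact hi0min i' h hm'
          · have : i' = k := by omega
            subst this
            exact not_lt.mp hlt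
    · rw [if_neg hm]
      rcases ih with ⟨hrn, hnone⟩ | ⟨i0, hi0k, hi0m, hi0v, hi0min⟩
      · left
        refine ⟨hrn, ?_⟩
        intro i hi
        rcases Nat.lt_or_ge i k with h | h
        · exact hnone i h
        · have : i = k := by omega
          subst this; exact hm
      · right
        refine ⟨i0, by omega, hi0m, hi0v, ?_⟩
        intro i' hi' hm'
        rcases Nat.lt_or_ge i' k with h | h
        · exact hi0min i' h hm'
        · have : i' = k := by omega
          subst this; exact absurd hm' hm

theorem main_case (s t : List Char) (hlen : s.length = t.length) (hz : 0 < s.length) :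
    (if (kmpSearch (s ++ s) t).filter (fun i => i < s.length) = [] then (-1 : Int)
     else match (((kmpSearch (s ++ s) t).filter (fun i => i < s.length)).map
            (fun i => (s.length - i) % s.length)).min? with
       | some k => (k : Int)
       | none => -1) = (List.range s.length).foldl (bStep s t) (-1) := by
  have hmem : ∀ x, x ∈ (kmpSearch (s ++ s) t).filter (fun i => i < s.length) ↔
      (x < s.length ∧ s.drop x ++ s.take x = t) := by
    intro x
    rw [List.mem_filter]
    simp only [decide_eq_true_eq]
    constructor
    · rintro ⟨hx, hxn⟩
      have hk := (kmpSearch_mem (s ++ s) t (by omega) x).mp hx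
      refine ⟨hxn, ?_⟩
      have h2 := hk.2
      rw [← hlen, rot_eq s x (by omega)] at h2
      exact h2
    · rintro ⟨hxn, hrot⟩
      refine ⟨?_, by simpa using hxn⟩
      apply (kmpSearch_mem (s ++ s) t (by omega) x).mpr
      refine ⟨by simp; omega, ?_⟩
      rw [← hlen, rot_eq s x (by omega)]
      exact hrot
  rcases b_loop s t s.length with ⟨hr, hnone⟩ | ⟨i0, hi0, hm0, hv0, hmin0⟩
  · rw [hr]
    have hind : (kmpSearch (s ++ s) t).filter (fun i => i < s.length) = [] := by
      rw [List.filter_eq_nil_iff]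
      intro a ha hdec
      simp only [decide_eq_true_eq] at hdec
      have := (hmem a).mp (List.mem_filter.mpr ⟨ha, by simpa using hdec⟩)
      exact hnone a this.1 this.2
    rw [if_pos hind]
  · have hi0mem : i0 ∈ (kmpSearch (s ++ s) t).filter (fun i => i < s.length) :=
      (hmem i0).mpr ⟨hi0, hm0⟩
    have hind : (kmpSearch (s ++ s) t).filter (fun i => i < s.length) ≠ [] :=
      List.ne_nil_of_mem hi0mem
    rw [if_neg hind]
    have hLne : (((kmpSearch (s ++ s) t).filter (fun i => i < s.length)).map
        (fun i => (s.length - i) % s.length)) ≠ [] := by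
      simpa using hind
    obtain ⟨v, hv⟩ : ∃ v, (((kmpSearch (s ++ s) t).filter (fun i => i < s.length)).map
        (fun i => (s.length - i) % s.length)).min? = some v := by
      cases hL : (((kmpSearch (s ++ s) t).filter (fun i => i < s.length)).map
          (fun i => (s.length - i) % s.length)).min? with
      | none => exact absurd (List.min?_eq_none_iff.mp hL) hLne
      | some v => exact ⟨v, rfl⟩
    rw [hv]
    obtain ⟨hvmem, hvmin⟩ := List.min?_eq_some_iff.mp hv
    rw [hv0]
    obtain ⟨x, hxmem, hxv⟩ := List.mem_map.mp hvmem
    obtain ⟨hxn, hxrot⟩ := (hmem x).mp hxmem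
    have h2 : v ≤ (s.length - i0) % s.length :=
      hvmin _ (List.mem_map.mpr ⟨i0, hi0mem, rfl⟩)
    have h3 : (((s.length - i0) % s.length : Nat) : Int) ≤ ((s.length - x) % s.length : Nat) := by
      rw [← hv0]
      exact hmin0 x hxn hxrot
    have h3' : (s.length - i0) % s.length ≤ (s.length - x) % s.length := by exact_mod_cast h3
    rw [hxv] at h3'
    show ((v : Nat) : Int) = (((s.length - i0) % s.length : Nat) : Int)
    exact_mod_cast Nat.le_antisymm h2 h3' 

-- ===== VERDICT (by name: the statement is the Claim_ definition above) =====
theorem find_cyclic_shift_spec : Claim_equal_find_cyclic_shift := by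
  intro S T _
  show find_cyclic_shift S T = find_cyclic_shift_alt S T
  simp only [find_cyclic_shift, find_cyclic_shift_alt]
  by_cases h1 : S.toList.length ≠ T.toList.length
  · rw [if_pos h1, if_pos h1]
  · rw [if_neg h1, if_neg h1]
    by_cases h2 : S.toList.length = 0
    · rw [if_pos h2, if_pos h2]
    · rw [if_neg h2, if_neg h2]
      push Not at h1
      exact main_case S.toList T.toList h1 (by omega)
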